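-- pv_equiv track=rewrite | github.com/MikalaiLutonin/DZ_4 | DZ_4/B.py | encode_equation
-- ===== SOURCE A (Python) =====
-- def encode_equation(equation: str) -> dict:                                   # функция преобразования из строки в словарь
--     new_equation = []
--     equation = equation.replace(' = 0', '').replace(' + ', ' ').replace(' - ', ' -').split(' ')
--     for item in equation:
--         if not 'x' in item:
--             new_equation.append([item, 0])
--         else:
--             if item.endswith('x'):
--                 if item == 'x':
--                     new_equation.append(['1', '1'])
--                 elif item == '-x':
--                     new_equation.append(['-1', '1'])
--                 else:
--                     new_equation.append((item + '1').split('*x'))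
--             else:
--                 if item.startswith('x'):                                            # если строка начинается с x, то ...
--                     new_equation.append(('1' + item).split('x**'))
--                 elif item.startswith('-x'):
--                     new_equation.append(item.replace('-', '-1').split('x**'))
--                 else:
--                     new_equation.append(item.split('*x**'))
--     equation_pattern = {}
--     for item in new_equation:
--         equation_pattern[int(item[1])] = int(item[0])
--     return equation_pattern
-- ===== SOURCE B (Python) =====
-- def encode_equation(equation: str) -> dict:
--     # Same preprocessing as the original; each token is then parsed positionally
--     # around its first 'x' instead of a startswith/endswith cascade of splits.
--     tokens = equation.replace(' = 0', '').replace(' + ', ' ').replace(' - ', ' -').split(' ')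
--     result = {}
--     for tok in tokens:
--         if 'x' not in tok:
--             result[0] = int(tok)
--             continue
--         i = tok.index('x')
--         left, right = tok[:i], tok[i + 1:]
--         if left == '':
--             coef = 1
--         elif left == '-':
--             coef = -1
--         elif left.endswith('*'):
--             coef = int(left[:-1])
--         else:
--             raise ValueError('cannot parse coefficient: ' + tok)
--         if right == '':
--             exp = 1
--         elif right.startswith('**') and right[2:].isdigit():
--             exp = int(right[2:])
--         else:
--             raise ValueError('cannot parse exponent: ' + tok)
--         result[exp] = coef
--     return result
-- ===== Notes on version B (the rewrite author's own statement) =====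
-- stated objective: simpler
-- what changed: B replaces A's startswith/endswith cascade of string splits into an intermediate list-of-lists with a single pass that parses each token positionally around the first occurrence of the unknown x (prefix -> coefficient, suffix -> exponent) and writes straight into the dict.
-- outside the precondition, e.g. on encode_equation('2*x3*x'): A returns {3: 2}, B raises ValueError; on encode_equation('-x**-2'): A returns {-12: -1}, B raises ValueError; on encode_equation('x**1_0'): A returns {10: 1}, B raises ValueError
import Mathlib
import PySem

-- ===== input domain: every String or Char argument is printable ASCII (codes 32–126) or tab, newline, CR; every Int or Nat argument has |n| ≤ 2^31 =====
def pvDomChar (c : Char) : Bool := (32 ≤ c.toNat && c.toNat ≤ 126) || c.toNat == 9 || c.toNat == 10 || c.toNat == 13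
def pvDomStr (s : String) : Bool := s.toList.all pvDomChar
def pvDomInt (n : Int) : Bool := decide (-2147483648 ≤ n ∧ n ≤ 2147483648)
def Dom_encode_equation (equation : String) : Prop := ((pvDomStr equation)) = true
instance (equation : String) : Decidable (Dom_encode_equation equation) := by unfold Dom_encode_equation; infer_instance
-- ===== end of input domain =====

-- B keeps A's preprocessing but parses each token positionally around the first unknown x
-- (one pass straight into the dict) instead of A's startswith/endswith cascade of
-- string splits into an intermediate list; objective: simpler, same cost.

-- ===== PORT A =====
-- int(cs); (PySem.Int.ofChars? cs) = none exactly where Python's int raises ValueError,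
-- which Pre_ excludes, so the .getD 0 default is never reached on admitted inputs.
def pvInt (cs : List Char) : Int := (PySem.Int.ofChars? cs).getD 0

-- the body of A's first loop: one appended entry per token (Python appends the mixed
-- list [item, 0]; its int 0 is transliterated as the digit string ['0'], int('0') = 0 = int(0))
def pvStepA (item : List Char) : List (List Char) :=
  if !(PySem.Chars.isIn ['x'] item) then [item, ['0']]
  else if PySem.Chars.endswith item ['x'] then
    if item = ['x'] then [['1'], ['1']]
    else if item = ['-', 'x'] then [['-', '1'], ['1']]
    else PySem.Chars.splitOn (item ++ ['1']) ['*', 'x']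
  else if PySem.Chars.startswith item ['x'] then
    PySem.Chars.splitOn (['1'] ++ item) ['x', '*', '*']
  else if PySem.Chars.startswith item ['-', 'x'] then
    PySem.Chars.splitOn (PySem.Chars.replace item ['-'] ['-', '1']) ['x', '*', '*']
  else PySem.Chars.splitOn item ['*', 'x', '*', '*']

def encode_equation (equation : String) : List (Int × Int) :=
  let toks := PySem.Chars.splitOn (PySem.Chars.replace (PySem.Chars.replace
      (PySem.Chars.replace equation.toList [' ', '=', ' ', '0'] [])
      [' ', '+', ' '] [' ']) [' ', '-', ' '] [' ', '-']) [' ']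
  let newEq : List (List (List Char)) := toks.foldl (fun acc item => acc ++ [pvStepA item]) []
  -- item[1] / item[0]: IndexError (= the [] default of pyGetD feeding pvInt) only outside Pre_
  (newEq.foldl (fun d item =>
      d.insert (pvInt (PySem.List.pyGetD item 1 [])) (pvInt (PySem.List.pyGetD item 0 [])))
    (PySem.Dict.empty : PySem.Dict Int Int)).items

-- ===== PORT B =====
-- B's loop body; the two 0-valued else branches are where Source B raises ValueError —
-- Pre_ excludes exactly those tokens.  tok[:i] / tok[i+1:] with i = tok.index('x') ≥ 0
-- are exactly List.take i / List.drop (i+1); left[:-1] is dropLast, right[2:] is drop 2.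
def pvStepB (d : PySem.Dict Int Int) (tok : List Char) : PySem.Dict Int Int :=
  if !(PySem.Chars.isIn ['x'] tok) then d.insert 0 (pvInt tok)
  else
    let i := (PySem.Chars.find tok ['x']).toNat
    let left := tok.take i
    let right := tok.drop (i + 1)
    let coef : Int :=
      if left = [] then 1
      else if left = ['-'] then -1
      else if PySem.Chars.endswith left ['*'] then pvInt left.dropLast
      else 0
    let exp : Int :=
      if right = [] then 1
      else if PySem.Chars.startswith right ['*', '*'] && PySem.Chars.strIsdigit (right.drop 2)
        then pvInt (right.drop 2)
      else 0
    d.insert exp coef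

def encode_equation_alt (equation : String) : List (Int × Int) :=
  let toks := PySem.Chars.splitOn (PySem.Chars.replace (PySem.Chars.replace
      (PySem.Chars.replace equation.toList [' ', '=', ' ', '0'] [])
      [' ', '+', ' '] [' ']) [' ', '-', ' '] [' ', '-']) [' ']
  (toks.foldl pvStepB (PySem.Dict.empty : PySem.Dict Int Int)).items

-- ===== PRECONDITION & SPEC =====
-- an int()-parsable coefficient string (which can contain neither 'x' nor '*')
def pvIntOK (s : List Char) : Bool :=
  (PySem.Int.ofChars? s).isSome && !(s.contains 'x') && !(s.contains '*')

-- the well-formed tokens: a plain integer, x, -x, c*x, x**d, -x**d or c*x**d with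
-- int()-parsable c and digit-string d
def pvTokOK (t : List Char) : Bool :=
  if PySem.Chars.isIn ['x'] t then
    (t = ['x'] : Bool) || (t = ['-', 'x'] : Bool)
    || (PySem.Chars.endswith t ['*', 'x'] && pvIntOK (t.dropLast.dropLast))
    || (PySem.Chars.startswith t ['x', '*', '*'] && PySem.Chars.strIsdigit (t.drop 3))
    || (PySem.Chars.startswith t ['-', 'x', '*', '*'] && PySem.Chars.strIsdigit (t.drop 4))
    || (PySem.Chars.isIn ['*', 'x', '*', '*'] t
        && pvIntOK (t.take (PySem.Chars.find t ['*', 'x', '*', '*']).toNat)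
        && PySem.Chars.strIsdigit (t.drop ((PySem.Chars.find t ['*', 'x', '*', '*']).toNat + 4)))
  else (PySem.Int.ofChars? t).isSome

def pvTokens (equation : String) : List (List Char) :=
  PySem.Chars.splitOn (PySem.Chars.replace (PySem.Chars.replace
      (PySem.Chars.replace equation.toList [' ', '=', ' ', '0'] [])
      [' ', '+', ' '] [' ']) [' ', '-', ' '] [' ', '-']) [' ']

-- Pre_ excludes exactly the malformed tokens: those on which A raises (ValueError from
-- int(), IndexError from a failed split), and the degenerate tokens on which A's
-- split/replace preprocessing happens to return an accidental value (a second star-x separator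
-- occurrence swallowed by split, a signed or underscored exponent corrupted or
-- accepted by int()) — Source B raises ValueError on all of those.
def Pre_encode_equation (equation : String) : Prop :=
  ∀ t ∈ pvTokens equation, pvTokOK t = true

instance (equation : String) : Decidable (Pre_encode_equation equation) := by
  unfold Pre_encode_equation; infer_instance

def pvWitness_encode_equation : String := "x**2 + 2*x - 3 = 0"

def Spec_encode_equation (equation : String) (out : List (Int × Int)) : Prop :=
  out = encode_equation_alt equation
instance (equation : String) (out : List (Int × Int)) : Decidable (Spec_encode_equation equation out) := by
  unfold Spec_encode_equation; infer_instance

-- ===== CLAIM (what is proved, stated in full; the proofs are below) =====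
def Claim_equal_encode_equation : Prop := ∀ (equation : String), Dom_encode_equation equation → Pre_encode_equation equation → Spec_encode_equation equation (encode_equation equation)

-- ===== LEMMAS AND PROOFS =====

lemma splitOn_go_walk (c0 : Char) (sep' a l cur : List Char) (acc : List (List Char)) (fuel : Nat)
    (ha : c0 ∉ a) :
    PySem.Chars.splitOn.go (c0 :: sep') (fuel + a.length) (a ++ l) cur acc
      = PySem.Chars.splitOn.go (c0 :: sep') fuel l (a.reverse ++ cur) acc := by
  induction a generalizing cur fuel with
  | nil => simp
  | cons c a' ih =>
    have hc : c ≠ c0 := by rintro rfl; simp at ha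
    have h1 : fuel + (c :: a').length = (fuel + a'.length) + 1 := by simp; omega
    rw [h1]
    show PySem.Chars.splitOn.go (c0 :: sep') (fuel + a'.length + 1) (c :: (a' ++ l)) cur acc = _
    rw [PySem.Chars.splitOn.go]
    simp [List.isPrefixOf, hc.symm, ih _ _ (by intro h; exact ha (List.mem_cons_of_mem _ h))]

lemma splitOn_go_clean (c0 : Char) (sep' l cur : List Char) (acc : List (List Char)) (fuel : Nat)
    (hl : c0 ∉ l) (hf : l.length < fuel) :
    PySem.Chars.splitOn.go (c0 :: sep') fuel l cur acc = ((cur.reverse ++ l) :: acc).reverse := by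
  induction l generalizing cur fuel with
  | nil =>
    cases fuel with
    | zero => omega
    | succ n => rw [PySem.Chars.splitOn.go.eq_def]; simp
  | cons c rest ih =>
    have hc : c ≠ c0 := by rintro rfl; simp at hl
    cases fuel with
    | zero => omega
    | succ n =>
      rw [PySem.Chars.splitOn.go.eq_def]
      simp only [List.isPrefixOf, hc.symm, beq_iff_eq, Bool.and_eq_true, false_and, if_neg,
        not_false_eq_true]
      rw [ih _ _ (by intro h; exact hl (List.mem_cons_of_mem _ h)) (by simp at hf ⊢; omega)]
      simp

lemma splitOn_go_hit (c0 : Char) (sep' b cur : List Char) (acc : List (List Char)) (fuel : Nat) :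
    PySem.Chars.splitOn.go (c0 :: sep') (fuel + 1) ((c0 :: sep') ++ b) cur acc
      = PySem.Chars.splitOn.go (c0 :: sep') fuel b [] (cur.reverse :: acc) := by
  have hpre : (c0 :: sep').isPrefixOf ((c0 :: sep') ++ b) = true := by
    simpa [List.isPrefixOf_iff_prefix] using List.prefix_append _ _
  rw [show ((c0 :: sep') ++ b) = c0 :: (sep' ++ b) from rfl, PySem.Chars.splitOn.go.eq_def]
  simp only [List.cons_append] at hpre
  simp [hpre, List.drop_left']

lemma pv_splitOn_two (c0 : Char) (sep' a b : List Char) (ha : c0 ∉ a) (hb : c0 ∉ b) :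
    PySem.Chars.splitOn (a ++ (c0 :: sep') ++ b) (c0 :: sep') = [a, b] := by
  unfold PySem.Chars.splitOn
  have hlen : (a ++ (c0 :: sep') ++ b).length + 1
      = ((sep'.length + b.length + 2) + a.length) := by simp; omega
  rw [hlen, List.append_assoc, splitOn_go_walk _ _ _ _ _ _ _ ha,
    show sep'.length + b.length + 2 = (sep'.length + b.length + 1) + 1 from by omega,
    splitOn_go_hit, splitOn_go_clean _ _ _ _ _ _ hb (by omega)]
  simp

lemma replace_go_clean (c0 : Char) (old' new l acc : List Char) (fuel : Nat)
    (hl : c0 ∉ l) (hf : l.length ≤ fuel) :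
    PySem.Chars.replace.go (c0 :: old') new fuel l acc = acc.reverse ++ l := by
  induction l generalizing acc fuel with
  | nil => cases fuel <;> simp [PySem.Chars.replace.go]
  | cons c rest ih =>
    have hc : c ≠ c0 := by rintro rfl; simp at hl
    cases fuel with
    | zero => simp at hf
    | succ n =>
      rw [PySem.Chars.replace.go.eq_def]
      simp only [List.isPrefixOf, hc.symm, beq_iff_eq, Bool.and_eq_true, false_and, if_neg,
        not_false_eq_true]
      rw [ih _ _ (by intro h; exact hl (List.mem_cons_of_mem _ h)) (by simp at hf ⊢; omega)]
      simp

lemma pv_replace_single (c0 : Char) (rest new : List Char) (h : c0 ∉ rest) :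
    PySem.Chars.replace (c0 :: rest) [c0] new = new ++ rest := by
  unfold PySem.Chars.replace
  simp only [List.isEmpty_cons, Bool.false_eq_true, if_neg, not_false_eq_true]
  have hpre : [c0].isPrefixOf (c0 :: rest) = true := by
    simpa [List.isPrefixOf_iff_prefix] using List.prefix_append [c0] rest
  rw [show (c0 :: rest).length = rest.length + 1 from by simp, PySem.Chars.replace.go.eq_def]
  simp only [hpre, if_pos]
  rw [show List.drop [c0].length (c0 :: rest) = rest from by simp,
    replace_go_clean _ _ _ _ _ _ h (le_refl _)]
  simp

lemma pv_find_go_char (c0 : Char) (a r : List Char) (k : Nat) (h : c0 ∉ a) :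
    PySem.Chars.find.go [c0] (a ++ c0 :: r) k = ((k : Int) + a.length) := by
  induction a generalizing k with
  | nil => rw [PySem.Chars.find.go.eq_def]; simp [List.isPrefixOf]
  | cons c a' ih =>
    have hc : c ≠ c0 := by rintro rfl; simp at h
    rw [List.cons_append, PySem.Chars.find.go.eq_def]
    simp only [List.isPrefixOf, hc.symm, beq_iff_eq, Bool.and_eq_true, false_and, if_neg,
      not_false_eq_true]
    rw [ih _ (by intro hm; exact h (List.mem_cons_of_mem _ hm))]
    simp only [List.length_cons]; push_cast; omega

lemma pv_find_char (c0 : Char) (a r : List Char) (h : c0 ∉ a) :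
    PySem.Chars.find (a ++ c0 :: r) [c0] = (a.length : Int) := by
  unfold PySem.Chars.find
  rw [pv_find_go_char _ _ _ _ h]; simp

lemma pv_isIn_singleton (c : Char) (l : List Char) :
    PySem.Chars.isIn [c] l = true ↔ c ∈ l := by
  rw [PySem.Chars.isIn_iff_infix, List.singleton_infix_iff]

lemma pv_digit_props {c : Char} (h : PySem.Chars.isdigit c = true) : c ≠ 'x' ∧ c ≠ '*' ∧ c ≠ '-' := by
  refine ⟨?_, ?_, ?_⟩ <;> rintro rfl <;> revert h <;> decide

lemma pv_intok_elim {s : List Char} (h : pvIntOK s = true) :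
    (PySem.Int.ofChars? s).isSome ∧ 'x' ∉ s ∧ '*' ∉ s ∧ s ≠ [] := by
  simp only [pvIntOK, Bool.and_eq_true, Bool.not_eq_true', List.contains_eq_mem,
    decide_eq_false_iff_not] at h
  refine ⟨h.1.1, h.1.2, h.2, ?_⟩
  rintro rfl; revert h; decide

lemma pv_digits_elim {e : List Char} (h : PySem.Chars.strIsdigit e = true) :
    e ≠ [] ∧ 'x' ∉ e ∧ '*' ∉ e ∧ '-' ∉ e := by
  simp only [PySem.Chars.strIsdigit, Bool.and_eq_true, Bool.not_eq_true', List.isEmpty_eq_false_iff,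
    List.all_eq_true] at h
  refine ⟨h.1, ?_, ?_, ?_⟩ <;> intro hm <;>
    first
      | exact (pv_digit_props (h.2 _ hm)).1 rfl
      | exact (pv_digit_props (h.2 _ hm)).2.1 rfl
      | exact (pv_digit_props (h.2 _ hm)).2.2 rfl

lemma pv_endswith_x_false (pre e : List Char) (he : e ≠ []) (hx : 'x' ∉ e) :
    PySem.Chars.endswith (pre ++ e) ['x'] = false := by
  rw [Bool.eq_false_iff]
  intro h
  rw [PySem.Chars.endswith_iff] at h
  rcases h with ⟨u, hu⟩
  have h1 : (u ++ ['x']).getLast? = some 'x' := by simp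
  rw [hu, List.getLast?_append_of_ne_nil _ he] at h1
  exact hx (List.mem_of_getLast? h1)


lemma pv_ne_of_len {α : Type} {l r : List α} (h : l.length ≠ r.length) : l ≠ r :=
  fun he => h (he ▸ rfl)

theorem pv_step_eq (d : PySem.Dict Int Int) (t : List Char) (h : pvTokOK t = true) :
    d.insert (pvInt (PySem.List.pyGetD (pvStepA t) 1 []))
             (pvInt (PySem.List.pyGetD (pvStepA t) 0 [])) = pvStepB d t := by
  by_cases hx : PySem.Chars.isIn ['x'] t = true
  · rw [pvTokOK, if_pos hx] at h
    simp only [Bool.or_eq_true, Bool.and_eq_true, decide_eq_true_eq] at h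
    rcases h with ((((h | h) | ⟨hend, hint⟩) | ⟨hpre, hdig⟩) | ⟨hpre, hdig⟩) | ⟨⟨hin, hint⟩, hdig⟩
    · subst h; rfl
    · subst h; rfl
    · rw [PySem.Chars.endswith_iff] at hend
      rcases hend with ⟨p, rfl⟩
      rw [show (p ++ ['*', 'x']).dropLast.dropLast = p from by
        rw [show p ++ ['*', 'x'] = (p ++ ['*']) ++ ['x'] from by simp,
          List.dropLast_concat, List.dropLast_concat]] at hint
      obtain ⟨hsome, hxp, hsp, hne⟩ := pv_intok_elim hint
      have hlen : 1 ≤ p.length := List.length_pos_of_ne_nil hne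
      rw [pvStepA, if_neg (by simp [hx]),
        if_pos (by
          rw [PySem.Chars.endswith_iff, show p ++ ['*', 'x'] = (p ++ ['*']) ++ ['x'] from by simp]
          exact List.suffix_append _ _),
        if_neg (pv_ne_of_len (by simp; try omega)),
        if_neg (pv_ne_of_len (by simp; try omega))]
      rw [show (p ++ ['*', 'x']) ++ ['1'] = p ++ ('*' :: ['x']) ++ ['1'] from by simp,
        pv_splitOn_two '*' ['x'] p ['1'] hsp (by simp)]
      rw [pvStepB, if_neg (by simp [hx])]
      have hfind : PySem.Chars.find (p ++ ['*', 'x']) ['x'] = ((p.length + 1 : Nat) : Int) := by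
        have h2 := pv_find_char 'x' (p ++ ['*']) [] (by simp [hxp]; try decide)
        simp only [List.append_assoc, List.cons_append, List.nil_append] at h2 ⊢
        rw [h2]; simp
      rw [hfind]
      simp only [Int.toNat_natCast]
      rw [show List.take (p.length + 1) (p ++ ['*', 'x']) = p ++ ['*'] from by
          rw [show p ++ ['*', 'x'] = (p ++ ['*']) ++ ['x'] from by simp]
          exact List.take_left' (by simp),
        show List.drop (p.length + 1 + 1) (p ++ ['*', 'x']) = [] from by
          rw [show p.length + 1 + 1 = (p ++ ['*', 'x']).length from by simp]
          exact List.drop_length]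
      rw [if_pos rfl,
        if_neg (by simp),
        if_neg (pv_ne_of_len (by simp; try omega)),
        if_pos (by rw [PySem.Chars.endswith_iff]; exact List.suffix_append _ _)]
      rw [List.dropLast_concat]
      rfl
    · rw [PySem.Chars.startswith_iff] at hpre
      rcases hpre with ⟨u, rfl⟩
      rw [show List.drop 3 (['x', '*', '*'] ++ u) = u from rfl] at hdig
      rw [show ['x', '*', '*'] ++ u = 'x' :: '*' :: '*' :: u from rfl] at hx ⊢
      obtain ⟨hune, hxu, hsu, hmu⟩ := pv_digits_elim hdig
      rw [pvStepA, if_neg (by simp; exact (pv_isIn_singleton 'x' _).mpr (by simp)),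
        if_neg (by
          rw [show 'x' :: '*' :: '*' :: u = ('x' :: '*' :: '*' :: []) ++ u from rfl,
            pv_endswith_x_false _ _ hune hxu]; simp),
        if_pos (by rw [PySem.Chars.startswith_iff]; exact ⟨'*' :: '*' :: u, rfl⟩)]
      rw [show ['1'] ++ ('x' :: '*' :: '*' :: u) = ['1'] ++ ('x' :: ['*', '*']) ++ u from by simp,
        pv_splitOn_two 'x' ['*', '*'] ['1'] u (by simp) hxu]
      rw [pvStepB, if_neg (by simp; exact (pv_isIn_singleton 'x' _).mpr (by simp))]
      have hfind : PySem.Chars.find ('x' :: '*' :: '*' :: u) ['x'] = ((0 : Nat) : Int) :=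
        pv_find_char 'x' [] ('*' :: '*' :: u) (by simp)
      rw [hfind]
      simp only [Int.toNat_natCast, List.take_zero, List.drop_succ_cons, List.drop_zero]
      rw [if_neg (by simp),
        if_pos (by simp [PySem.Chars.startswith, List.isPrefixOf, hdig]),
        if_pos trivial]
      rfl
    · rw [PySem.Chars.startswith_iff] at hpre
      rcases hpre with ⟨u, rfl⟩
      rw [show List.drop 4 (['-', 'x', '*', '*'] ++ u) = u from rfl] at hdig
      rw [show ['-', 'x', '*', '*'] ++ u = '-' :: 'x' :: '*' :: '*' :: u from rfl] at hx ⊢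
      obtain ⟨hune, hxu, hsu, hmu⟩ := pv_digits_elim hdig
      rw [pvStepA, if_neg (by simp; exact (pv_isIn_singleton 'x' _).mpr (by simp)),
        if_neg (by
          rw [show '-' :: 'x' :: '*' :: '*' :: u = ('-' :: 'x' :: '*' :: '*' :: []) ++ u from rfl,
            pv_endswith_x_false _ _ hune hxu]; simp),
        if_neg (by
          intro hpx; rw [PySem.Chars.startswith_iff] at hpx
          rcases hpx with ⟨v, hv⟩; simp at hv),
        if_pos (by rw [PySem.Chars.startswith_iff]; exact ⟨'*' :: '*' :: u, rfl⟩)]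
      rw [pv_replace_single '-' _ _ (by simp [hmu]; try decide)]
      rw [show ['-', '1'] ++ ('x' :: '*' :: '*' :: u) = ['-', '1'] ++ ('x' :: ['*', '*']) ++ u from by simp,
        pv_splitOn_two 'x' ['*', '*'] ['-', '1'] u (by simp) hxu]
      rw [pvStepB, if_neg (by simp; exact (pv_isIn_singleton 'x' _).mpr (by simp))]
      have hfind : PySem.Chars.find ('-' :: 'x' :: '*' :: '*' :: u) ['x'] = ((1 : Nat) : Int) := by
        have h2 := pv_find_char 'x' ['-'] ('*' :: '*' :: u) (by simp; try decide)
        simpa using h2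
      rw [hfind]
      simp only [Int.toNat_natCast]
      rw [show List.take 1 ('-' :: 'x' :: '*' :: '*' :: u) = ['-'] from rfl,
        show List.drop (1 + 1) ('-' :: 'x' :: '*' :: '*' :: u) = '*' :: '*' :: u from rfl]
      rw [if_neg (by simp),
        if_pos (by simp [PySem.Chars.startswith, List.isPrefixOf, hdig]),
        if_neg (by simp), if_pos rfl]
      rfl
    · have hnn : 0 ≤ PySem.Chars.find t ['*', 'x', '*', '*'] :=
        (PySem.Chars.find_nonneg_iff _ _).mpr ((PySem.Chars.isIn_iff_infix _ _).mp hin)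
      obtain ⟨hpref, -⟩ := PySem.Chars.find_spec hnn
      rcases hpref with ⟨u, hu⟩
      have ht : t = List.take (PySem.Chars.find t ['*', 'x', '*', '*']).toNat t
          ++ ('*' :: 'x' :: '*' :: '*' :: u) := by
        conv_lhs => rw [← List.take_append_drop (PySem.Chars.find t ['*', 'x', '*', '*']).toNat t]
        rw [← hu]
        rfl
      have hdrop4 : List.drop ((PySem.Chars.find t ['*', 'x', '*', '*']).toNat + 4) t = u := by
        have h4 : List.drop 4 (List.drop (PySem.Chars.find t ['*', 'x', '*', '*']).toNat t)
            = List.drop ((PySem.Chars.find t ['*', 'x', '*', '*']).toNat + 4) t := by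
          rw [List.drop_drop, Nat.add_comm]
        rw [← h4, ← hu]
        rfl
      rw [hdrop4] at hdig
      obtain ⟨hsome, hxa, hsa, hane⟩ := pv_intok_elim hint
      obtain ⟨hune, hxu, hsu, hmu⟩ := pv_digits_elim hdig
      generalize hA : List.take (PySem.Chars.find t ['*', 'x', '*', '*']).toNat t = a at *
      rw [ht] at hx ⊢
      clear ht hu hnn hin hA hdrop4
      have hlen : 1 ≤ a.length := List.length_pos_of_ne_nil hane
      rw [pvStepA, if_neg (by simp [hx]),
        if_neg (by
          rw [show a ++ ('*' :: 'x' :: '*' :: '*' :: u) = (a ++ ['*', 'x', '*', '*']) ++ u from by simp,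
            pv_endswith_x_false _ _ hune hxu]; simp),
        if_neg (by
          intro hpx; rw [PySem.Chars.startswith_iff] at hpx
          rcases hpx with ⟨v, hv⟩
          cases a with
          | nil => exact hane rfl
          | cons a0 a' => simp at hv; exact hxa (hv.1 ▸ List.mem_cons_self)),
        if_neg (by
          intro hpx; rw [PySem.Chars.startswith_iff] at hpx
          rcases hpx with ⟨v, hv⟩
          cases a with
          | nil => exact hane rfl
          | cons a0 a' =>
            cases a' with
            | nil => simp at hv
            | cons a1 a'' =>
              simp at hv
              exact hxa (by rw [hv.2.1]; exact List.mem_cons_of_mem _ List.mem_cons_self))]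
      rw [show a ++ ('*' :: 'x' :: '*' :: '*' :: u) = a ++ ('*' :: ['x', '*', '*']) ++ u from by simp,
        pv_splitOn_two '*' ['x', '*', '*'] a u hsa hsu]
      rw [show a ++ ['*', 'x', '*', '*'] ++ u = a ++ ('*' :: 'x' :: '*' :: '*' :: u) from by simp]
      rw [pvStepB, if_neg (by simp [hx])]
      have hfind : PySem.Chars.find (a ++ ('*' :: 'x' :: '*' :: '*' :: u)) ['x']
          = ((a.length + 1 : Nat) : Int) := by
        have h2 := pv_find_char 'x' (a ++ ['*']) ('*' :: '*' :: u) (by simp [hxa]; try decide)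
        simp only [List.append_assoc, List.cons_append, List.nil_append] at h2 ⊢
        rw [h2]; simp
      rw [hfind]
      simp only [Int.toNat_natCast]
      rw [show List.take (a.length + 1) (a ++ ('*' :: 'x' :: '*' :: '*' :: u)) = a ++ ['*'] from by
          rw [show a ++ ('*' :: 'x' :: '*' :: '*' :: u) = (a ++ ['*']) ++ ('x' :: '*' :: '*' :: u) from by simp]
          exact List.take_left' (by simp),
        show List.drop (a.length + 1 + 1) (a ++ ('*' :: 'x' :: '*' :: '*' :: u)) = '*' :: '*' :: u from by
          rw [show a ++ ('*' :: 'x' :: '*' :: '*' :: u) = (a ++ ['*', 'x']) ++ ('*' :: '*' :: u) from by simp]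
          exact List.drop_left' (by simp)]
      rw [if_neg (by simp),
        if_pos (by simp [PySem.Chars.startswith, List.isPrefixOf, hdig]),
        if_neg (by simp),
        if_neg (pv_ne_of_len (by simp; try omega)),
        if_pos (by rw [PySem.Chars.endswith_iff]; exact List.suffix_append _ _)]
      rw [List.dropLast_concat]
      rfl
  · rw [pvTokOK, if_neg hx] at h
    rw [pvStepA, pvStepB]
    simp only [hx, Bool.not_false, if_pos]
    rfl

theorem pv_fold_eq (toks : List (List Char)) (h : ∀ t ∈ toks, pvTokOK t = true)
    (d : PySem.Dict Int Int) :
    (toks.map pvStepA).foldl (fun d item =>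
        d.insert (pvInt (PySem.List.pyGetD item 1 [])) (pvInt (PySem.List.pyGetD item 0 []))) d
      = toks.foldl pvStepB d := by
  induction toks generalizing d with
  | nil => rfl
  | cons t ts ih =>
    simp only [List.map_cons, List.foldl_cons]
    rw [pv_step_eq d t (h t List.mem_cons_self)]
    exact ih (fun x hx => h x (List.mem_cons_of_mem _ hx)) _

-- ===== VERDICT (by name: the statement is the Claim_ definition above) =====
theorem encode_equation_spec : Claim_equal_encode_equation := by
  intro equation hdom hpre
  unfold Spec_encode_equation encode_equation encode_equation_alt
  unfold Pre_encode_equation pvTokens at hpre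
  dsimp only
  rw [PySem.List.foldl_append_singleton_eq_map, List.nil_append, pv_fold_eq _ hpre]
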